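-- pv_equiv track=rewrite | github.com/andreanun/TIP-101 | Week3/session2/pset1.py | sum_of_unique_elements
-- ===== SOURCE A (Python) =====
-- def sum_of_unique_elements(lst1, lst2):
--   count = {}
--
--   for i in lst1 + lst2:
--     if i in count:
--       count[i] += 1
--     else:
--       count[i] = 1
--
--   unique_total = 0
--   for num in lst1:
--     if count[num] == 1:
--       unique_total += num
--   return unique_total
-- ===== SOURCE B (Python) =====
-- def sum_of_unique_elements(lst1, lst2):
--   tagged = sorted([(x, 0) for x in lst1] + [(x, 1) for x in lst2], key=lambda p: p[0])
--   total = 0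
--   i = 0
--   while i < len(tagged):
--     v, t = tagged[i]
--     j = i + 1
--     while j < len(tagged) and tagged[j][0] == v:
--       j += 1
--     if j == i + 1 and t == 0:
--       total += v
--     i = j
--   return total
-- ===== Notes on version B (the rewrite author's own statement) =====
-- stated objective: alternative
-- what changed: B replaces A's hash-counter over lst1+lst2 with a sort-based algorithm: it tags each element with its source list, sorts the tagged pairs by value, and scans the sorted list for runs of length one whose single element came from lst1, summing those values.
import Mathlib
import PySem

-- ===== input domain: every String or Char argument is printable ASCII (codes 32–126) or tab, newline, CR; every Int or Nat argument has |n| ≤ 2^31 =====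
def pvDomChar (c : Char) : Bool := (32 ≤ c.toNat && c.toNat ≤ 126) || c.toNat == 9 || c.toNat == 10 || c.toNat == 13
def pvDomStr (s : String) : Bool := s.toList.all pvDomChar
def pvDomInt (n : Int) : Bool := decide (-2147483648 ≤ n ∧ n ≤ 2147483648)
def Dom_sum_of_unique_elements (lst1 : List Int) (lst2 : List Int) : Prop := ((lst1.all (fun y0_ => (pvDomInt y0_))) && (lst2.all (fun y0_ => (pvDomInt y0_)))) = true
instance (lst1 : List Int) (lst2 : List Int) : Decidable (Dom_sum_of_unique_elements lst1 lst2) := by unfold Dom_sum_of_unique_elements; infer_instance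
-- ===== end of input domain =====

-- B replaces A's counter dict over lst1+lst2 with sort-tagged-pairs-then-scan-runs;
-- return values proved equal on all inputs (objective: alternative algorithm).

-- ===== PORT A =====
-- count[num] in A's second loop never misses (num ∈ lst1 is always a key), so getD 0 is exact.
def sum_of_unique_elements (lst1 : List Int) (lst2 : List Int) : Int :=
  let count := (lst1 ++ lst2).foldl
    (fun d i => if d.contains i then d.modify i 0 (· + 1) else d.insert i 1)
    (PySem.Dict.empty : PySem.Dict Int Int)
  lst1.foldl (fun acc num => if count.getD num 0 == 1 then acc + num else acc) 0

-- ===== PORT B =====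
-- B's inner while loop advances j past the run of equal values: ported as
-- takeWhile (the run after position i) / dropWhile (the scan resuming at j).
def pvScanRuns : List (Int × Int) → Int
  | [] => 0
  | (v, t) :: rest =>
      (if (rest.takeWhile (fun q => q.1 == v)).isEmpty && t == 0 then v else 0)
        + pvScanRuns (rest.dropWhile (fun q => q.1 == v))
termination_by l => l.length
decreasing_by
  simp only [List.length_cons]
  exact Nat.lt_succ_of_le (List.Sublist.length_le (List.dropWhile_sublist _))

def sum_of_unique_elements_alt (lst1 : List Int) (lst2 : List Int) : Int :=
  let tagged := PySem.List.sorted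
    (lst1.map (fun x => (x, (0 : Int))) ++ lst2.map (fun x => (x, (1 : Int))))
    (fun p => p.1) false
  pvScanRuns tagged

-- ===== PRECONDITION & SPEC =====
def Spec_sum_of_unique_elements (lst1 : List Int) (lst2 : List Int) (out : Int) : Prop := out = sum_of_unique_elements_alt lst1 lst2
instance (lst1 : List Int) (lst2 : List Int) (out : Int) : Decidable (Spec_sum_of_unique_elements lst1 lst2 out) := by unfold Spec_sum_of_unique_elements; infer_instance

-- ===== CLAIM (what is proved, stated in full; the proofs are below) =====
def Claim_equal_sum_of_unique_elements : Prop := ∀ (lst1 : List Int) (lst2 : List Int), Dom_sum_of_unique_elements lst1 lst2 → Spec_sum_of_unique_elements lst1 lst2 (sum_of_unique_elements lst1 lst2)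

-- ===== LEMMAS AND PROOFS =====

-- A's contains/modify/insert counting loop reads back as List.count.
theorem getD_foldl_contains_modify (l : List Int) (d : PySem.Dict Int Int) (v : Int) :
    (l.foldl (fun d i => if d.contains i then d.modify i 0 (· + 1) else d.insert i 1) d).getD v 0
      = d.getD v 0 + l.count v := by
  induction l generalizing d with
  | nil => simp
  | cons x xs ih =>
    simp only [List.foldl_cons, ih]
    by_cases hc : d.contains x
    · simp only [hc, if_true, PySem.Dict.getD_modify]
      rcases eq_or_ne v x with rfl | hne
      · simp; ring
      · simp [hne, Ne.symm hne]
    · simp only [hc, if_false, Bool.false_eq_true, PySem.Dict.getD_insert]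
      rcases eq_or_ne v x with rfl | hne
      · rw [PySem.Dict.getD_of_not_contains (h := by simpa using hc)]
        simp [add_comm]
      · simp [hne, Ne.symm hne]

-- the conditional-accumulating loop is the sum of the filtered list
theorem foldl_if_add_eq_sum_filter (p : Int → Bool) (l : List Int) (a : Int) :
    l.foldl (fun acc x => if p x then acc + x else acc) a = a + (l.filter p).sum := by
  induction l generalizing a with
  | nil => simp
  | cons x xs ih =>
    by_cases h : p x
    · simp [h, ih, add_assoc]
    · simp [h, ih]

-- after dropping the leading run of value v, a sorted ≥-v tail contains no v at all
theorem dropWhile_ne_of_sorted (v : Int) (rest : List (Int × Int))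
    (hge : ∀ b ∈ rest, v ≤ b.1) (hp : rest.Pairwise (fun a b => a.1 ≤ b.1)) :
    ∀ q ∈ rest.dropWhile (fun q => q.1 == v), q.1 ≠ v := by
  induction rest with
  | nil => simp
  | cons a as ih =>
    by_cases ha : a.1 = v
    · rw [List.dropWhile_cons_of_pos (by simpa using ha)]
      exact ih (fun b hb => hge b (List.mem_cons_of_mem _ hb)) hp.tail
    · rw [List.dropWhile_cons_of_neg (by simpa using ha)]
      intro q hq
      rcases List.mem_cons.mp hq with rfl | hq
      · exact ha
      · have h1 : v ≤ a.1 := hge a (List.mem_cons_self ..)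
        have h2 : a.1 ≤ q.1 := (List.pairwise_cons.mp hp).1 q hq
        intro h; apply ha; omega

-- the scan of a key-sorted list sums the values of its singleton runs that carry tag 0
theorem pvScanRuns_sorted (l : List (Int × Int))
    (hs : l.Pairwise (fun a b => a.1 ≤ b.1)) :
    pvScanRuns l
      = ((l.filter (fun p => p.2 == 0 && l.countP (fun q => q.1 == p.1) == 1)).map
          (fun p => p.1)).sum := by
  induction l using pvScanRuns.induct with
  | case1 => simp [pvScanRuns]
  | case2 v t rest ih =>
    set pr := fun q : Int × Int => q.1 == v with hpr
    set run := rest.takeWhile pr with hrunDef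
    set rest' := rest.dropWhile pr with hrest'Def
    have hsplit : rest = run ++ rest' := (List.takeWhile_append_dropWhile ..).symm
    have hge : ∀ b ∈ rest, v ≤ b.1 := fun b hb => (List.pairwise_cons.mp hs).1 b hb
    have hpRest : rest.Pairwise (fun a b => a.1 ≤ b.1) := hs.tail
    have hrunv : ∀ q ∈ run, q.1 = v := fun q hq => by
      have := List.mem_takeWhile_imp hq; simpa [hpr] using this
    have hne : ∀ q ∈ rest', q.1 ≠ v := dropWhile_ne_of_sorted v rest hge hpRest
    have hpRest' : rest'.Pairwise (fun a b => a.1 ≤ b.1) := by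
      rw [hsplit] at hpRest; exact (List.pairwise_append.mp hpRest).2.1
    -- counts of v in the whole list
    have hcnt_run : run.countP pr = run.length :=
      List.countP_eq_length.mpr (fun q hq => by simp [hpr, hrunv q hq])
    have hcnt_rest' : rest'.countP pr = 0 :=
      List.countP_eq_zero.mpr (fun q hq => by simp [hpr, hne q hq])
    have hcntv : ((v, t) :: rest).countP pr = 1 + run.length := by
      rw [hsplit, List.countP_cons, List.countP_append, hcnt_run, hcnt_rest']
      simp [hpr]; omega
    -- counts of a rest' value in the whole list collapse to rest'
    have hcnt_other : ∀ q ∈ rest',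
        ((v, t) :: rest).countP (fun r => r.1 == q.1) = rest'.countP (fun r => r.1 == q.1) := by
      intro q hq
      rw [hsplit, List.countP_cons, List.countP_append]
      have h1 : run.countP (fun r => r.1 == q.1) = 0 :=
        List.countP_eq_zero.mpr (fun r hr => by simp [hrunv r hr, Ne.symm (hne q hq)])
      have h2 : ¬ ((v, t).1 == q.1) = true := by simp [Ne.symm (hne q hq)]
      simp [h1, h2]
    -- the filter splits into the head contribution and rest''s own filter
    set predL := fun p : Int × Int =>
      p.2 == 0 && ((v, t) :: rest).countP (fun q => q.1 == p.1) == 1 with hpredL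
    have hfil_run : run.filter predL = [] := by
      apply List.filter_eq_nil_iff.mpr
      intro q hq
      have hq1 : q.1 = v := hrunv q hq
      have : ((v, t) :: rest).countP (fun r => r.1 == q.1) = 1 + run.length := by
        rw [hq1]; exact hcntv
      have hlen : 1 ≤ run.length := List.length_pos_of_mem hq
      have h1 : ((1 + run.length : Nat) == 1) = false := by
        simp only [beq_eq_false_iff_ne, ne_eq]
        omega
      simp only [hpredL, this, h1, Bool.and_false, Bool.false_eq_true, not_false_eq_true]
    have hfil_rest' : rest'.filter predL
        = rest'.filter (fun p => p.2 == 0 && rest'.countP (fun q => q.1 == p.1) == 1) := by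
      apply List.filter_congr
      intro q hq
      simp only [hpredL, hcnt_other q hq]
    have hvt : predL (v, t) = (t == 0 && ((1 + run.length : Nat) == 1)) := by
      simp only [hpredL]
      rw [show (fun q : Int × Int => q.1 == (v, t).1) = pr from rfl, hcntv]
    have hheadpred : predL (v, t) = ((run.isEmpty) && t == 0) := by
      rw [hvt]
      cases run with
      | nil => simp [Bool.and_comm]
      | cons a as =>
        have h1 : ((1 + (a :: as).length : Nat) == 1) = false := by
          simp only [beq_eq_false_iff_ne, ne_eq, List.length_cons]
          omega
        simp only [h1, Bool.and_false, List.isEmpty_cons, Bool.false_and]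
    rw [pvScanRuns]
    rw [show ((v, t) :: rest).filter predL
        = ((if predL (v, t) then [(v, t)] else []) ++ (run.filter predL ++ rest'.filter predL)) by
      rw [hsplit, List.filter_cons, List.filter_append]
      split <;> simp]
    rw [hfil_run, hfil_rest', hheadpred, ih hpRest']
    cases hE : run.isEmpty <;> cases ht : (t == 0) <;> simp

theorem sum_of_unique_elements_spec : Claim_equal_sum_of_unique_elements := by
  intro lst1 lst2 _
  unfold Spec_sum_of_unique_elements sum_of_unique_elements sum_of_unique_elements_alt
  simp only [foldl_if_add_eq_sum_filter, zero_add]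
  set T := lst1.map (fun x => (x, (0 : Int))) ++ lst2.map (fun x => (x, (1 : Int))) with hT
  have hperm : (PySem.List.sorted T (fun p => p.1) false).Perm T := PySem.List.sorted_perm ..
  rw [pvScanRuns_sorted _ (PySem.List.sorted_pairwise ..)]
  have hpred : (fun p : Int × Int =>
        p.2 == 0 && (PySem.List.sorted T (fun p => p.1) false).countP (fun q => q.1 == p.1) == 1)
      = (fun p : Int × Int => p.2 == 0 && T.countP (fun q => q.1 == p.1) == 1) := by
    funext p; rw [hperm.countP_eq]
  rw [hpred, ((hperm.filter _).map (fun p : Int × Int => p.1)).sum_eq]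
  rw [hT, List.filter_append, List.filter_map, List.filter_map]
  have h2nil : lst2.filter ((fun p : Int × Int => p.2 == 0 && T.countP (fun q => q.1 == p.1) == 1)
      ∘ (fun x => (x, (1 : Int)))) = [] := by
    apply List.filter_eq_nil_iff.mpr; intro x _; simp
  rw [h2nil]
  simp only [List.map_nil, List.map_append, List.map_map, List.sum_append, List.sum_nil, add_zero]
  have hcomp : ((fun p : Int × Int => p.1) ∘ (fun x : Int => (x, (0 : Int)))) = id := rfl
  rw [hcomp, List.map_id]
  apply congrArg
  apply List.filter_congr
  intro x hx
  simp only [Function.comp, getD_foldl_contains_modify, PySem.Dict.getD_empty, zero_add,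
    List.count_append]
  have hc1 : lst1.countP ((fun q : Int × Int => q.1 == x) ∘ fun y => (y, (0 : Int)))
      = lst1.count x := rfl
  have hc2 : lst2.countP ((fun q : Int × Int => q.1 == x) ∘ fun y => (y, (1 : Int)))
      = lst2.count x := rfl
  by_cases h : lst1.count x + lst2.count x = 1
  · simp [hc1, hc2, h]
  · have h' : ((lst1.count x : Int) + (lst2.count x : Int)) ≠ 1 := by
      omega
    simp [hc1, hc2, h, h']
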